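-- pv_equiv track=rewrite | github.com/hll-truco/hll-truco | plots/common/parse_utils.py | joint
-- ===== SOURCE A (Python) =====
-- def joint(XYZs:list[list[tuple[int,int,int]]]) -> list[tuple[int,int,int]]:
--     X, Y, Z = [], [], []
--     delta_x = 0
--     delta_z = 0
--     for _X, _Y, _Z in XYZs:
--         X += [x+delta_x for x in _X]
--         Y += _Y
--         Z += [z+delta_z for z in _Z]
--         delta_x += _X[-1]
--         delta_z += _Z[-1]
--     return X, Y, Z
-- ===== SOURCE B (Python) =====
-- def joint(XYZs):
--     # build back-to-front: process sublists last-to-first and shift the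
--     # already-built suffix by the current sublist's last x / last z
--     X, Y, Z = [], [], []
--     for _X, _Y, _Z in reversed(XYZs):
--         ox, oz = _X[-1], _Z[-1]
--         X = _X + [x + ox for x in X]
--         Y = _Y + Y
--         Z = _Z + [z + oz for z in Z]
--     return X, Y, Z
-- ===== Notes on version B (the rewrite author's own statement) =====
-- stated objective: alternative
-- what changed: Replaces A's forward loop that carries running x/z offset accumulators by a back-to-front construction: sublists are processed last-to-first and the already-built suffix result is shifted by the current sublist's last element, so no offset state exists at all.
import Mathlib
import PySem

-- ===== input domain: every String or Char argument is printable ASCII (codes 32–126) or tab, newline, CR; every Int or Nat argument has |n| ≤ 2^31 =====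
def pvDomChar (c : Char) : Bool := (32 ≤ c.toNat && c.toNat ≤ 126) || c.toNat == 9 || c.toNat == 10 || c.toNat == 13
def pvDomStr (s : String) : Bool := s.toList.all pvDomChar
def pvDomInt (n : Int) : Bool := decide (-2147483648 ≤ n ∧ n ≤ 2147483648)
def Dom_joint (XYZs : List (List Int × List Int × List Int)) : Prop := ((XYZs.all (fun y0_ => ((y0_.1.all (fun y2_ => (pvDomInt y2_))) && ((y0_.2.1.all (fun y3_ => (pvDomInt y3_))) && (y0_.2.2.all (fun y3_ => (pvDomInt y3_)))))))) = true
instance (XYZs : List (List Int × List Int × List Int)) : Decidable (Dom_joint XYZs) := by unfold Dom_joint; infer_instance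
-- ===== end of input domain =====

-- B builds the result back-to-front (processing sublists last-to-first and shifting the
-- already-built suffix by the current sublist's last element) instead of A's forward loop
-- with running offset accumulators (objective: alternative decomposition, same result).

-- ===== PORT A =====
-- loop body of A's single for-loop, as a named step function over the state (X, Y, Z, delta_x, delta_z)
def jointStepA (st : List Int × List Int × List Int × Int × Int)
    (t : List Int × List Int × List Int) : List Int × List Int × List Int × Int × Int :=
  (st.1 ++ t.1.map (fun x => x + st.2.2.2.1),
   st.2.1 ++ t.2.1,
   st.2.2.1 ++ t.2.2.map (fun z => z + st.2.2.2.2),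
   st.2.2.2.1 + (PySem.List.pyGet? t.1 (-1)).getD 0,     -- _X[-1]; none (IndexError) excluded by Pre_
   st.2.2.2.2 + (PySem.List.pyGet? t.2.2 (-1)).getD 0)   -- _Z[-1]

def joint (XYZs : List (List Int × List Int × List Int)) : List Int × List Int × List Int :=
  let s := XYZs.foldl jointStepA ([], [], [], 0, 0)
  (s.1, s.2.1, s.2.2.1)

-- ===== PORT B =====
-- body of B's loop over reversed(XYZs): prepend the current sublist, shifting the suffix
-- built so far by ox = _X[-1] / oz = _Z[-1]; a loop over the reversed list whose new state
-- is a function of the current element and the state built from the elements AFTER it is a foldr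
def jointStepB (t : List Int × List Int × List Int)
    (acc : List Int × List Int × List Int) : List Int × List Int × List Int :=
  let ox := (PySem.List.pyGet? t.1 (-1)).getD 0      -- _X[-1]; none (IndexError) excluded by Pre_
  let oz := (PySem.List.pyGet? t.2.2 (-1)).getD 0    -- _Z[-1]
  (t.1 ++ acc.1.map (fun x => x + ox),
   t.2.1 ++ acc.2.1,
   t.2.2 ++ acc.2.2.map (fun z => z + oz))

def joint_alt (XYZs : List (List Int × List Int × List Int)) : List Int × List Int × List Int :=
  XYZs.foldr jointStepB ([], [], [])

-- ===== PRECONDITION & SPEC =====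
-- Pre_ excludes exactly the inputs where Python A raises IndexError (_X[-1] or _Z[-1] on an empty sublist); B raises there too.
def Pre_joint (XYZs : List (List Int × List Int × List Int)) : Prop :=
  ∀ t ∈ XYZs, t.1 ≠ [] ∧ t.2.2 ≠ []
instance (XYZs : List (List Int × List Int × List Int)) : Decidable (Pre_joint XYZs) := by unfold Pre_joint; infer_instance
def pvWitness_joint : (List (List Int × List Int × List Int)) := [([1, 2], [5], [3]), ([4], [], [7, 8])]

def Spec_joint (XYZs : List (List Int × List Int × List Int)) (out : List Int × List Int × List Int) : Prop := out = joint_alt XYZs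
instance (XYZs : List (List Int × List Int × List Int)) (out : List Int × List Int × List Int) : Decidable (Spec_joint XYZs out) := by unfold Spec_joint; infer_instance

-- ===== CLAIM (what is proved, stated in full; the proofs are below) =====
def Claim_equal_joint : Prop := ∀ (XYZs : List (List Int × List Int × List Int)), Dom_joint XYZs → Pre_joint XYZs → Spec_joint XYZs (joint XYZs)

-- ===== LEMMAS AND PROOFS =====

-- Python's l[-1] with a default (the default is unreachable under Pre_)
def lastD (l : List Int) : Int := (PySem.List.pyGet? l (-1)).getD 0

-- reference shape: concatenation with a running offset, for one projected component
def goff (f : List Int × List Int × List Int → List Int) :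
    List (List Int × List Int × List Int) → Int → List Int
  | [], _ => []
  | t :: ts, d => (f t).map (fun x => x + d) ++ goff f ts (d + lastD (f t))

theorem foldA_eq (ts : List (List Int × List Int × List Int))
    (X Y Z : List Int) (dx dz : Int) :
    ts.foldl jointStepA (X, Y, Z, dx, dz) =
      (X ++ goff (fun t => t.1) ts dx,
       Y ++ ts.flatMap (fun t => t.2.1),
       Z ++ goff (fun t => t.2.2) ts dz,
       dx + (ts.map (fun t => lastD t.1)).sum,
       dz + (ts.map (fun t => lastD t.2.2)).sum) := by
  induction ts generalizing X Y Z dx dz with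
  | nil => simp [goff]
  | cons a ts ih =>
    simp only [List.foldl_cons, jointStepA, ih, goff, List.flatMap_cons, List.map_cons,
      List.sum_cons, lastD, Prod.mk.injEq]
    refine ⟨by simp, by simp, by simp, by ring, by ring⟩

-- shifting the starting offset shifts every element of the concatenation
theorem goff_shift (f : List Int × List Int × List Int → List Int)
    (ts : List (List Int × List Int × List Int)) (d e : Int) :
    goff f ts (d + e) = (goff f ts e).map (fun x => x + d) := by
  induction ts generalizing e with
  | nil => simp [goff]
  | cons a ts ih =>
    simp only [goff, List.map_append, List.map_map]
    congr 1
    · congr 1; funext x; simp [Function.comp]; ring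
    · rw [show d + e + lastD (f a) = d + (e + lastD (f a)) by ring, ih]

theorem foldB_eq (ts : List (List Int × List Int × List Int)) :
    ts.foldr jointStepB ([], [], []) =
      (goff (fun t => t.1) ts 0,
       ts.flatMap (fun t => t.2.1),
       goff (fun t => t.2.2) ts 0) := by
  induction ts with
  | nil => simp [goff]
  | cons a ts ih =>
    simp only [List.foldr_cons, ih, jointStepB, goff, List.flatMap_cons, Prod.mk.injEq]
    refine ⟨?_, trivial, ?_⟩
    · rw [show (0 : Int) + lastD a.1 = lastD a.1 + 0 by ring, goff_shift]
      simp [lastD]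
    · rw [show (0 : Int) + lastD a.2.2 = lastD a.2.2 + 0 by ring, goff_shift]
      simp [lastD]

-- ===== VERDICT (by name: the statement is the Claim_ definition above) =====
theorem joint_spec : Claim_equal_joint := by
  intro XYZs _ _
  show joint XYZs = joint_alt XYZs
  simp [joint, joint_alt, foldA_eq, foldB_eq]
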